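-- pv_equiv track=rewrite | github.com/khanhha/human_avatar_reconstruction | src/control_mesh_calc_weight_calculate.py | is_adjacent_tri
-- ===== SOURCE A (Python) =====
-- def is_adjacent_tri(t0, t1):
--     for i in range(3):
--         v00, v01 = t0[i], t0[(i+1)%3]
--         for j in range(3):
--             v10, v11 = t1[j], t1[(j+1)%3]
--             if (v00 == v10 and v01 == v11) or (v00 == v11 and v01 == v10):
--                 return True
--     return False
-- ===== SOURCE B (Python) =====
-- def is_adjacent_tri(t0, t1):
--     edges0 = {frozenset((t0[i], t0[(i + 1) % 3])) for i in range(3)}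
--     edges1 = {frozenset((t1[j], t1[(j + 1) % 3])) for j in range(3)}
--     return bool(edges0 & edges1)
-- ===== Notes on version B (the rewrite author's own statement) =====
-- stated objective: simpler
-- what changed: Replaces the 3x3 nested directed-edge comparison loop with building the three orientation-independent edge keys (frozensets) of each triangle and testing whether the two edge sets intersect.
import Mathlib
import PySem

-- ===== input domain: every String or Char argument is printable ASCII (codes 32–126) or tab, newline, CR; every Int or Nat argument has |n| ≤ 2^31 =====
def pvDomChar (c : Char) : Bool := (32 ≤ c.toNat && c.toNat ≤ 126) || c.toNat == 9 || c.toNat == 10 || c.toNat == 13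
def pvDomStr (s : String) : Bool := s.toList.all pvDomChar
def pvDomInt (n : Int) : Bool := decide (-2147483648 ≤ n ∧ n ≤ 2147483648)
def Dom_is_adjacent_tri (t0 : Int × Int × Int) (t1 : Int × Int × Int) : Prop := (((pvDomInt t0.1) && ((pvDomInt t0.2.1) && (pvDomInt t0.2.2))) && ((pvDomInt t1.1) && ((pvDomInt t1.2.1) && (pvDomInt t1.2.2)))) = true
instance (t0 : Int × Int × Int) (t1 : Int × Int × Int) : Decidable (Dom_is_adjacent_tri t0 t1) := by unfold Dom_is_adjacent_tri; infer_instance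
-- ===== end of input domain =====

-- B replaces A's 3x3 directed-edge scan by intersecting the two triangles' sets of undirected edge keys (simpler).

-- ===== PORT A =====
-- tuple indexing t[i] for i in {0,1,2} (exact: only these indices occur in A)
def pvTupGet (t : Int × Int × Int) (i : Int) : Int :=
  if i = 0 then t.1 else if i = 1 then t.2.1 else t.2.2

def is_adjacent_tri (t0 : Int × Int × Int) (t1 : Int × Int × Int) : Bool :=
  (PySem.List.pyRange 0 3 1).any (fun i =>
    let v00 := pvTupGet t0 i
    let v01 := pvTupGet t0 (PySem.Int.mod (i + 1) 3)
    (PySem.List.pyRange 0 3 1).any (fun j =>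
      let v10 := pvTupGet t1 j
      let v11 := pvTupGet t1 (PySem.Int.mod (j + 1) 3)
      (v00 == v10 && v01 == v11) || (v00 == v11 && v01 == v10)))

-- ===== PORT B =====
-- frozenset((a, b)) as an orientation-independent key: the sorted pair (a self-edge (a,a) stays (a,a))
def pvEdgeKey (a b : Int) : Int × Int := if a ≤ b then (a, b) else (b, a)

-- the triangle's three undirected edges as a set of keys
def pvEdges (t : Int × Int × Int) : PySem.Set (Int × Int) :=
  PySem.Set.ofList [pvEdgeKey t.1 t.2.1, pvEdgeKey t.2.1 t.2.2, pvEdgeKey t.2.2 t.1]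

def is_adjacent_tri_alt (t0 : Int × Int × Int) (t1 : Int × Int × Int) : Bool :=
  !(PySem.Set.inter (pvEdges t0) (pvEdges t1)).isEmpty

-- ===== PRECONDITION & SPEC =====
def Spec_is_adjacent_tri (t0 : Int × Int × Int) (t1 : Int × Int × Int) (out : Bool) : Prop := out = is_adjacent_tri_alt t0 t1
instance (t0 : Int × Int × Int) (t1 : Int × Int × Int) (out : Bool) : Decidable (Spec_is_adjacent_tri t0 t1 out) := by unfold Spec_is_adjacent_tri; infer_instance

-- ===== CLAIM (what is proved, stated in full; the proofs are below) =====
def Claim_equal_is_adjacent_tri : Prop := ∀ (t0 : Int × Int × Int) (t1 : Int × Int × Int), Dom_is_adjacent_tri t0 t1 → Spec_is_adjacent_tri t0 t1 (is_adjacent_tri t0 t1)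

-- ===== LEMMAS AND PROOFS =====

theorem pvEdgeKey_eq_iff (a b c d : Int) :
    pvEdgeKey a b = pvEdgeKey c d ↔ (a = c ∧ b = d) ∨ (a = d ∧ b = c) := by
  unfold pvEdgeKey
  split_ifs <;> simp [Prod.ext_iff] <;> omega

-- ===== VERDICT (by name: the statement is the Claim_ definition above) =====
theorem is_adjacent_tri_spec : Claim_equal_is_adjacent_tri := by
  intro t0 t1 _
  obtain ⟨a, b, c⟩ := t0
  obtain ⟨d, e, f⟩ := t1
  unfold Spec_is_adjacent_tri
  rw [Bool.eq_iff_iff]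
  have hB : (is_adjacent_tri_alt (a, b, c) (d, e, f) = true) ↔
      ∃ x, x ∈ pvEdges (a, b, c) ∧ x ∈ pvEdges (d, e, f) := by
    unfold is_adjacent_tri_alt
    rw [Bool.not_eq_eq_eq_not, Bool.not_true, List.isEmpty_eq_false_iff_exists_mem]
    constructor
    · rintro ⟨x, hx⟩
      exact ⟨x, (PySem.Set.mem_inter _ _ _).1 hx⟩
    · rintro ⟨x, hx⟩
      exact ⟨x, (PySem.Set.mem_inter _ _ _).2 hx⟩
  rw [hB]
  unfold is_adjacent_tri pvEdges
  simp only [show PySem.List.pyRange 0 3 1 = [0, 1, 2] from by decide,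
    List.any_cons, List.any_nil,
    show (PySem.Int.mod (0 + 1) 3 : Int) = 1 from by decide,
    show (PySem.Int.mod (1 + 1) 3 : Int) = 2 from by decide,
    show (PySem.Int.mod (2 + 1) 3 : Int) = 0 from by decide,
    pvTupGet, PySem.Set.mem_ofList]
  norm_num [pvEdgeKey_eq_iff]
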